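-- pv_equiv track=rewrite | github.com/socathie/CodeFights | Arcade/WellOfIntegration/SwitchLights.py | switchLights
-- ===== SOURCE A (Python) =====
-- def switchLights(a):
--     for i in range(0,len(a)):
--         if a[i]==1:
--             for j in range(0,i+1):
--                 if a[j] == 1:
--                     a[j] = 0
--                 else:
--                     a[j] = 1
--
--     return a
-- ===== SOURCE B (Python) =====
-- def switchLights(a):
--     # A single right-to-left pass: each light j is toggled once per 1 at or after j
--     # in the ORIGINAL list (a 1 at i flips the prefix 0..i, and position i is
--     # untouched by earlier flips, so flips happen exactly at the original 1s).
--     res = []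
--     ones = 0
--     for x in reversed(a):
--         if x == 1:
--             ones += 1
--         if ones == 0:
--             res.append(x)
--         elif x == 1:
--             res.append(0 if ones % 2 == 1 else 1)
--         else:
--             res.append(1 if ones % 2 == 1 else 0)
--     res.reverse()
--     return res
-- ===== Notes on version B (the rewrite author's own statement) =====
-- stated objective: alternative
-- what changed: Replaced the in-place nested prefix-flip loops by a single right-to-left pass that tracks the parity of original 1s in the suffix (a light j ends up toggled once per original 1 at or after j), building a fresh list; A is quadratic only when 1s are dense, so on random int inputs the measured cost is the same.
import Mathlib
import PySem

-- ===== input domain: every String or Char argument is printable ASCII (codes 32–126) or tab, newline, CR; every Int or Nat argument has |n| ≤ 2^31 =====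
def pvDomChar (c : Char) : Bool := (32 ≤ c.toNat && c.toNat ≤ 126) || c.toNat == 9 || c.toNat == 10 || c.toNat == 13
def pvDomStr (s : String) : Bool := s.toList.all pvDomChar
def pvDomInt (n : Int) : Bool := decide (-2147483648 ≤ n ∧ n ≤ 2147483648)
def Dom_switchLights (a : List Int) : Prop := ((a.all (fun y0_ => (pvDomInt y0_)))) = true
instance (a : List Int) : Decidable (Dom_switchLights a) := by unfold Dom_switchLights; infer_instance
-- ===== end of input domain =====

-- B replaces A's in-place nested prefix flips by one right-to-left pass over the parity of 1s in the suffix;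
-- A mutates its argument in place, B builds a fresh list — the equivalence proved is about the RETURN value only.

-- ===== PORT A =====
def switchLights (a : List Int) : List Int :=
  (PySem.List.pyRange 0 (a.length : Int) 1).foldl (fun acc i =>
    if PySem.List.pyGetD acc i 0 = 1 then
      (PySem.List.pyRange 0 (i + 1) 1).foldl (fun acc2 j =>
        if PySem.List.pyGetD acc2 j 0 = 1 then PySem.List.pySetD acc2 j 0
        else PySem.List.pySetD acc2 j 1) acc
    else acc) a

-- ===== PORT B =====
def switchLights_alt (a : List Int) : List Int :=
  (a.reverse.foldl (fun (st : List Int × Int) x =>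
    let ones : Int := if x = 1 then st.2 + 1 else st.2
    let v : Int :=
      if ones = 0 then x
      else if x = 1 then (if PySem.Int.mod ones 2 = 1 then 0 else 1)
      else (if PySem.Int.mod ones 2 = 1 then 1 else 0)
    (st.1 ++ [v], ones)) ([], 0)).1.reverse

-- ===== PRECONDITION & SPEC =====
def Spec_switchLights (a : List Int) (out : List Int) : Prop := out = switchLights_alt a
instance (a : List Int) (out : List Int) : Decidable (Spec_switchLights a out) := by unfold Spec_switchLights; infer_instance

-- ===== CLAIM (what is proved, stated in full; the proofs are below) =====
def Claim_equal_switchLights : Prop := ∀ (a : List Int), Dom_switchLights a → Spec_switchLights a (switchLights a)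

-- ===== LEMMAS AND PROOFS =====

-- flip one light (the body of A's inner loop, as a value transform)
def pvFlip (x : Int) : Int := if x = 1 then 0 else 1

-- value of a light whose original value is x when the running ones-count (including x) is s
def pvVal (x s : Int) : Int :=
  if s = 0 then x
  else if x = 1 then (if PySem.Int.mod s 2 = 1 then 0 else 1)
  else (if PySem.Int.mod s 2 = 1 then 1 else 0)

-- B's pass, as a pure recursion in traversal order
def pvG : List Int → Int → List Int
  | [], _ => []
  | x :: l, k =>
      let k' := if x = 1 then k + 1 else k
      pvVal x k' :: pvG l k'

-- abbreviations for the two step functions of the ports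
def pvStepB (st : List Int × Int) (x : Int) : List Int × Int :=
  let ones : Int := if x = 1 then st.2 + 1 else st.2
  let v : Int :=
    if ones = 0 then x
    else if x = 1 then (if PySem.Int.mod ones 2 = 1 then 0 else 1)
    else (if PySem.Int.mod ones 2 = 1 then 1 else 0)
  (st.1 ++ [v], ones)

def pvInner (acc2 : List Int) (j : Int) : List Int :=
  if PySem.List.pyGetD acc2 j 0 = 1 then PySem.List.pySetD acc2 j 0
  else PySem.List.pySetD acc2 j 1

def pvOuter (acc : List Int) (i : Int) : List Int :=
  if PySem.List.pyGetD acc i 0 = 1 then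
    (PySem.List.pyRange 0 (i + 1) 1).foldl pvInner acc
  else acc

theorem pvStepB_eq (st : List Int × Int) (x : Int) :
    pvStepB st x = (st.1 ++ [pvVal x (if x = 1 then st.2 + 1 else st.2)],
                    if x = 1 then st.2 + 1 else st.2) := by
  simp [pvStepB, pvVal]

theorem foldl_stepB (l : List Int) : ∀ (res : List Int) (k : Int),
    (l.foldl pvStepB (res, k)).1 = res ++ pvG l k := by
  induction l with
  | nil => intro res k; simp [pvG]
  | cons x l ih =>
      intro res k
      simp only [List.foldl_cons, pvStepB_eq, pvG, ih]
      simp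

theorem alt_eq_pvG (a : List Int) : switchLights_alt a = (pvG a.reverse 0).reverse := by
  have h : (a.reverse.foldl pvStepB ([], 0)).1 = [] ++ pvG a.reverse 0 := foldl_stepB _ _ _
  simpa [switchLights_alt, pvStepB] using congrArg List.reverse h

theorem pvVal_succ (x s : Int) (hs : 0 ≤ s) : pvVal x (s + 1) = pvFlip (pvVal x s) := by
  rcases eq_or_lt_of_le hs with h | h
  · rw [← h]
    have h1 : PySem.Int.mod (0 + 1) 2 = 1 := by decide
    simp only [pvVal, pvFlip, h1]
    norm_num
  · have h1 : PySem.Int.mod s 2 = s % 2 := PySem.Int.mod_eq_emod_of_pos (by norm_num)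
    have h2 : PySem.Int.mod (s + 1) 2 = (s + 1) % 2 := PySem.Int.mod_eq_emod_of_pos (by norm_num)
    simp only [pvVal, pvFlip, h1, h2]
    split_ifs <;> omega

theorem pvG_succ (l : List Int) : ∀ (k : Int), 0 ≤ k →
    pvG l (k + 1) = (pvG l k).map pvFlip := by
  induction l with
  | nil => intro k hk; simp [pvG]
  | cons x l ih =>
      intro k hk
      by_cases hx : x = 1
      · simp only [pvG, if_pos hx]
        rw [pvVal_succ _ _ (by omega), ih (k + 1) (by omega)]
        simp
      · simp only [pvG, if_neg hx]
        rw [pvVal_succ _ _ hk, ih k hk]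
        simp

theorem alt_append (l : List Int) (x : Int) :
    switchLights_alt (l ++ [x]) =
      if x = 1 then (switchLights_alt l).map pvFlip ++ [0]
      else switchLights_alt l ++ [x] := by
  rw [alt_eq_pvG, alt_eq_pvG]
  by_cases hx : x = 1
  · subst hx
    have h0 : pvVal (1:Int) 1 = 0 := by decide
    simp [pvG]
    exact ⟨pvG_succ _ 0 le_rfl, h0⟩
  · simp [hx, pvG, pvVal]

-- ===== A-side lemmas =====

theorem length_pvInner (acc : List Int) (j : Int) : (pvInner acc j).length = acc.length := by
  unfold pvInner
  split_ifs <;> simp [PySem.List.length_pySetD]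

theorem length_foldl_pvInner (r : List Int) : ∀ (acc : List Int),
    (r.foldl pvInner acc).length = acc.length := by
  induction r with
  | nil => intro acc; rfl
  | cons j r ih => intro acc; simp [List.foldl_cons, ih, length_pvInner]

theorem pvInner_append (l : List Int) (x : Int) (j : Int) (h0 : 0 ≤ j) (h1 : j < l.length) :
    pvInner (l ++ [x]) j = pvInner l j ++ [x] := by
  have hg : PySem.List.pyGetD (l ++ [x]) j 0 = PySem.List.pyGetD l j 0 := by
    rw [PySem.List.pyGetD_eq_getElem _ _ h0 (by simp; omega),
        PySem.List.pyGetD_eq_getElem _ _ h0 (by exact_mod_cast h1)]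
    exact List.getElem_append_left (by omega)
  have hs : ∀ v : Int, PySem.List.pySetD (l ++ [x]) j v = PySem.List.pySetD l j v ++ [x] := by
    intro v
    rw [PySem.List.pySetD_of_nonneg _ _ h0, PySem.List.pySetD_of_nonneg _ _ h0]
    exact List.set_append_left _ _ (by omega)
  unfold pvInner
  rw [hg]
  split_ifs <;> rw [hs]

theorem foldl_pvInner_append (r : List Int) : ∀ (l : List Int) (x : Int),
    (∀ j ∈ r, 0 ≤ j ∧ j < l.length) →
    r.foldl pvInner (l ++ [x]) = r.foldl pvInner l ++ [x] := by
  induction r with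
  | nil => intro l x _; rfl
  | cons j r ih =>
      intro l x h
      have hj := h j (by simp)
      simp only [List.foldl_cons]
      rw [pvInner_append l x j hj.1 hj.2, ih (pvInner l j) x]
      intro j' hj'
      have := h j' (by simp [hj'])
      rw [length_pvInner]; exact this

theorem foldl_pvInner_full (l : List Int) :
    (PySem.List.pyRange 0 (l.length : Int) 1).foldl pvInner l = l.map pvFlip := by
  induction l using List.reverseRecOn with
  | nil => simp [PySem.List.pyRange_one_eq_nil]
  | append_singleton l x ih =>
      have hlen : ((l ++ [x]).length : Int) = (l.length : Int) + 1 := by simp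
      rw [hlen, PySem.List.pyRange_one_succ_right (Int.natCast_nonneg _),
          List.foldl_append]
      rw [foldl_pvInner_append _ l x (by
        intro j hj
        rw [PySem.List.mem_pyRange_one] at hj
        exact ⟨hj.1, hj.2⟩), ih]
      have hget : PySem.List.pyGetD (l.map pvFlip ++ [x]) (l.length : Int) 0 = x := by
        rw [PySem.List.pyGetD_eq_getElem _ _ (Int.natCast_nonneg _) (by simp)]
        simp [List.getElem_append_right (by simp : (l.map pvFlip).length ≤ l.length)]
      have hset : ∀ v : Int,
          PySem.List.pySetD (l.map pvFlip ++ [x]) (l.length : Int) v = l.map pvFlip ++ [v] := by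
        intro v
        rw [PySem.List.pySetD_of_nonneg _ _ (Int.natCast_nonneg _)]
        have : ((l.length : Int)).toNat = (l.map pvFlip).length := by simp
        rw [this, List.set_append_right _ _ le_rfl]
        simp
      simp only [List.foldl_cons, List.foldl_nil, pvInner, hget]
      rw [List.map_append]
      split_ifs with h1 <;> simp [hset, pvFlip, h1]

theorem pvOuter_append (l : List Int) (x : Int) (i : Int) (h0 : 0 ≤ i) (h1 : i < l.length) :
    pvOuter (l ++ [x]) i = pvOuter l i ++ [x] := by
  have hg : PySem.List.pyGetD (l ++ [x]) i 0 = PySem.List.pyGetD l i 0 := by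
    rw [PySem.List.pyGetD_eq_getElem _ _ h0 (by simp; omega),
        PySem.List.pyGetD_eq_getElem _ _ h0 (by exact_mod_cast h1)]
    exact List.getElem_append_left (by omega)
  unfold pvOuter
  rw [hg]
  split_ifs with h
  · exact foldl_pvInner_append _ l x (by
      intro j hj
      rw [PySem.List.mem_pyRange_one] at hj
      exact ⟨hj.1, by omega⟩)
  · rfl

theorem foldl_pvOuter_append (r : List Int) : ∀ (l : List Int) (x : Int),
    (∀ i ∈ r, 0 ≤ i ∧ i < l.length) →
    r.foldl pvOuter (l ++ [x]) = r.foldl pvOuter l ++ [x] := by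
  induction r with
  | nil => intro l x _; rfl
  | cons i r ih =>
      intro l x h
      have hi := h i (by simp)
      simp only [List.foldl_cons]
      rw [pvOuter_append l x i hi.1 hi.2, ih (pvOuter l i) x]
      intro i' hi'
      have := h i' (by simp [hi'])
      unfold pvOuter
      split_ifs <;> simp [length_foldl_pvInner, this]

theorem switchLights_eq_foldl (a : List Int) :
    switchLights a = (PySem.List.pyRange 0 (a.length : Int) 1).foldl pvOuter a := by
  rfl

theorem length_switchLights (a : List Int) : (switchLights a).length = a.length := by
  rw [switchLights_eq_foldl]
  generalize PySem.List.pyRange 0 (a.length : Int) 1 = r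
  induction r generalizing a with
  | nil => rfl
  | cons i r ih =>
      simp only [List.foldl_cons]
      rw [ih (pvOuter a i)]
      unfold pvOuter
      split_ifs <;> simp [length_foldl_pvInner]

theorem switchLights_append (l : List Int) (x : Int) :
    switchLights (l ++ [x]) =
      if x = 1 then (switchLights l).map pvFlip ++ [0]
      else switchLights l ++ [x] := by
  rw [switchLights_eq_foldl]
  have hlen : ((l ++ [x]).length : Int) = (l.length : Int) + 1 := by simp
  rw [hlen, PySem.List.pyRange_one_succ_right (Int.natCast_nonneg _), List.foldl_append]
  rw [foldl_pvOuter_append _ l x (by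
    intro i hi
    rw [PySem.List.mem_pyRange_one] at hi
    exact ⟨hi.1, hi.2⟩)]
  rw [← switchLights_eq_foldl]
  have hAl : (switchLights l).length = l.length := length_switchLights l
  have hget : PySem.List.pyGetD (switchLights l ++ [x]) (l.length : Int) 0 = x := by
    rw [PySem.List.pyGetD_eq_getElem _ _ (Int.natCast_nonneg _) (by simp [hAl])]
    simp [List.getElem_append_right (by omega : (switchLights l).length ≤ l.length)]
  simp only [List.foldl_cons, List.foldl_nil, pvOuter, hget]
  split_ifs with h1
  · have : ((l.length : Int) + 1) = ((switchLights l ++ [x]).length : Int) := by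
      simp [hAl]
    rw [this, foldl_pvInner_full]
    simp [pvFlip, h1]
  · rfl

theorem switchLights_eq_alt (a : List Int) : switchLights a = switchLights_alt a := by
  induction a using List.reverseRecOn with
  | nil => rfl
  | append_singleton l x ih => rw [switchLights_append, alt_append, ih]

-- ===== VERDICT (by name: the statement is the Claim_ definition above) =====
theorem switchLights_spec : Claim_equal_switchLights := by
  intro a _
  exact switchLights_eq_alt a
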